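-- pv_equiv track=rewrite | github.com/jdolivet/Programmation | Python/Artificial Intelligence/Project 4 - Constraint Satisfaction Problems/driver_3.py | prepareArcs
-- ===== SOURCE A (Python) =====
-- def prepareArcs(datas):
--     listArcs = []
--     for var1 in datas:
--         for var2 in datas:
--             if var1 != var2:
--                 if (var1[0] == var2[0]) or (var1[1] == var2[1]) or \
--                     ((var1[0]//3)+3*(var1[1]//3) == (var2[0]//3)+3*(var2[1]//3)):
--                     listArcs.append((var1, var2))
--     return listArcs
-- ===== SOURCE B (Python) =====
-- def _indexBy(key, datas):
--     d = {}
--     for i, v in enumerate(datas):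
--         d.setdefault(key(v), []).append(i)
--     return d
--
-- def _boxKey(v):
--     return (v[0] // 3) + 3 * (v[1] // 3)
--
-- def prepareArcs(datas):
--     rows = _indexBy(lambda v: v[0], datas)
--     cols = _indexBy(lambda v: v[1], datas)
--     boxes = _indexBy(_boxKey, datas)
--     listArcs = []
--     for var1 in datas:
--         cand = rows.get(var1[0], []) + cols.get(var1[1], []) + boxes.get(_boxKey(var1), [])
--         for j in sorted(set(cand)):
--             var2 = datas[j]
--             if var2 != var1:
--                 listArcs.append((var1, var2))
--     return listArcs
-- ===== Notes on version B (the rewrite author's own statement) =====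
-- stated objective: faster
-- what changed: Instead of testing every ordered pair of cells, B builds row/col/box index dictionaries in one pass and, per cell, unions the three buckets of candidate positions, deduplicates and sorts them to recover the original scan order.
import Mathlib
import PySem

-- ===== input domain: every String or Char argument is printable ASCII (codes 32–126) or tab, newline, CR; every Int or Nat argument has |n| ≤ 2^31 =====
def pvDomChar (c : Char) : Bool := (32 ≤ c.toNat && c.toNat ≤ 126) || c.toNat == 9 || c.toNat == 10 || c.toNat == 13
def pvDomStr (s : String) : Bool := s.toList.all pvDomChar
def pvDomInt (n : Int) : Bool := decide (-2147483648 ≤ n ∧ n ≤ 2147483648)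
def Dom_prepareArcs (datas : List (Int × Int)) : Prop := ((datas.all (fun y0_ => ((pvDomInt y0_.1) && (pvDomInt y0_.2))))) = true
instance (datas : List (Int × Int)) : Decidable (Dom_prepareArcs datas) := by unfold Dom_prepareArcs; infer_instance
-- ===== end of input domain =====

-- B replaces A's quadratic all-pairs scan by row/col/box index dictionaries built once,
-- emitting for each cell its deduplicated, position-sorted neighbours (objective: faster).

-- ===== PORT A =====
def prepareArcs (datas : List (Int × Int)) : List ((Int × Int) × (Int × Int)) :=
  datas.foldl (fun acc var1 =>
    datas.foldl (fun acc var2 =>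
      if var1 != var2 then
        if (var1.1 == var2.1) || (var1.2 == var2.2) ||
           (PySem.Int.floordiv var1.1 3 + 3 * PySem.Int.floordiv var1.2 3 ==
            PySem.Int.floordiv var2.1 3 + 3 * PySem.Int.floordiv var2.2 3) then
          acc ++ [(var1, var2)]
        else acc
      else acc) acc) []

-- ===== PORT B =====
-- d.setdefault(k, []).append(i)  ≡  d.modify k [] (· ++ [i])  (same Dict semantics: append at end if new key)
def pvIndexBy (key : (Int × Int) → Int) (datas : List (Int × Int)) : PySem.Dict Int (List Int) :=
  (PySem.List.enumerate datas).foldl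
    (fun d p => d.modify (key p.2) [] (· ++ [p.1])) PySem.Dict.empty

def pvBoxKey (v : Int × Int) : Int := PySem.Int.floordiv v.1 3 + 3 * PySem.Int.floordiv v.2 3

def prepareArcs_alt (datas : List (Int × Int)) : List ((Int × Int) × (Int × Int)) :=
  let rows := pvIndexBy (fun v => v.1) datas
  let cols := pvIndexBy (fun v => v.2) datas
  let boxes := pvIndexBy pvBoxKey datas
  datas.foldl (fun acc var1 =>
    let cand := rows.getD var1.1 [] ++ cols.getD var1.2 [] ++ boxes.getD (pvBoxKey var1) []
    (PySem.List.sorted (PySem.Set.ofList cand) (fun x => x) false).foldl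
      (fun acc j =>
        let var2 := PySem.List.pyGetD datas j (0, 0)
        if var2 != var1 then acc ++ [(var1, var2)] else acc) acc) []

-- ===== PRECONDITION & SPEC =====
def Spec_prepareArcs (datas : List (Int × Int)) (out : List ((Int × Int) × (Int × Int))) : Prop := out = prepareArcs_alt datas
instance (datas : List (Int × Int)) (out : List ((Int × Int) × (Int × Int))) : Decidable (Spec_prepareArcs datas out) := by unfold Spec_prepareArcs; infer_instance

-- ===== CLAIM (what is proved, stated in full; the proofs are below) =====
def Claim_equal_prepareArcs : Prop := ∀ (datas : List (Int × Int)), Dom_prepareArcs datas → Spec_prepareArcs datas (prepareArcs datas)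

-- ===== LEMMAS AND PROOFS =====
theorem pvIndexBy_getD (key : (Int × Int) → Int) (datas : List (Int × Int)) (c : Int) :
    (pvIndexBy key datas).getD c [] =
      (PySem.List.pyRange 0 (PySem.List.len datas)).filter
        (fun j => key (PySem.List.pyGetD datas j (0,0)) == c) := by
  unfold pvIndexBy
  rw [show (List.foldl (fun (d : PySem.Dict Int (List Int)) p => d.modify (key p.2) [] (· ++ [p.1]))
        PySem.Dict.empty (PySem.List.enumerate datas))
      = (List.foldl (fun (d : PySem.Dict Int (List Int)) q => d.modify q.1 [] (· ++ [q.2]))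
        PySem.Dict.empty ((PySem.List.enumerate datas).map (fun p => (key p.2, p.1))))
      from by rw [List.foldl_map]]
  rw [PySem.Dict.getD_foldl_modify_append]
  rw [PySem.List.enumerate_eq_map_pyRange datas (0,0)]
  simp [List.filter_map, List.map_map, Function.comp_def]
theorem pv_cand_eq (datas : List (Int × Int)) (var1 : Int × Int) :
    PySem.List.sorted (PySem.Set.ofList
        ((pvIndexBy (fun v => v.1) datas).getD var1.1 [] ++
         (pvIndexBy (fun v => v.2) datas).getD var1.2 [] ++
         (pvIndexBy pvBoxKey datas).getD (pvBoxKey var1) [])) (fun x => x) =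
      (PySem.List.pyRange 0 (PySem.List.len datas)).filter
        (fun j => ((PySem.List.pyGetD datas j (0,0)).1 == var1.1) ||
                  ((PySem.List.pyGetD datas j (0,0)).2 == var1.2) ||
                  (pvBoxKey (PySem.List.pyGetD datas j (0,0)) == pvBoxKey var1)) := by
  apply PySem.List.sorted_eq_of_perm_of_pairwise_lt
  · rw [List.perm_ext_iff_of_nodup (List.Nodup.filter _ (PySem.List.nodup_pyRange_one _ _))
        (PySem.Set.nodup_ofList _)]
    intro j
    simp only [PySem.Set.mem_ofList, pvIndexBy_getD, List.mem_filter, List.mem_append, Bool.or_eq_true]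
    tauto
  · exact List.Pairwise.filter _ (PySem.List.pairwise_lt_pyRange_one _ _)
theorem pv_inner_eq (datas : List (Int × Int)) (var1 : Int × Int)
    (acc : List ((Int × Int) × (Int × Int))) :
    datas.foldl (fun acc var2 =>
      if var1 != var2 then
        if (var1.1 == var2.1) || (var1.2 == var2.2) ||
           (PySem.Int.floordiv var1.1 3 + 3 * PySem.Int.floordiv var1.2 3 ==
            PySem.Int.floordiv var2.1 3 + 3 * PySem.Int.floordiv var2.2 3) then
          acc ++ [(var1, var2)]
        else acc
      else acc) acc =
    (PySem.List.sorted (PySem.Set.ofList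
        ((pvIndexBy (fun v => v.1) datas).getD var1.1 [] ++
         (pvIndexBy (fun v => v.2) datas).getD var1.2 [] ++
         (pvIndexBy pvBoxKey datas).getD (pvBoxKey var1) [])) (fun x => x)).foldl
      (fun acc j =>
        if PySem.List.pyGetD datas j (0, 0) != var1 then
          acc ++ [(var1, PySem.List.pyGetD datas j (0, 0))]
        else acc) acc := by
  rw [pv_cand_eq]
  rw [PySem.List.foldl_append_if (fun j => PySem.List.pyGetD datas j (0, 0) != var1)
        (fun j => (var1, PySem.List.pyGetD datas j (0, 0)))]
  rw [show (fun (acc : List ((Int × Int) × (Int × Int))) (var2 : Int × Int) =>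
      if var1 != var2 then
        if (var1.1 == var2.1) || (var1.2 == var2.2) ||
           (PySem.Int.floordiv var1.1 3 + 3 * PySem.Int.floordiv var1.2 3 ==
            PySem.Int.floordiv var2.1 3 + 3 * PySem.Int.floordiv var2.2 3) then
          acc ++ [(var1, var2)]
        else acc
      else acc)
    = (fun acc var2 =>
      if (var1 != var2) && ((var1.1 == var2.1) || (var1.2 == var2.2) ||
           (PySem.Int.floordiv var1.1 3 + 3 * PySem.Int.floordiv var1.2 3 ==
            PySem.Int.floordiv var2.1 3 + 3 * PySem.Int.floordiv var2.2 3)) then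
          acc ++ [(var1, var2)]
        else acc)
    from by funext acc v; by_cases h : (var1 != v) = true <;> simp [h]]
  rw [PySem.List.foldl_append_if _ (fun var2 => (var1, var2))]
  rw [List.filter_filter]
  rw [show (fun j => (var1, PySem.List.pyGetD datas j (0, 0)))
      = (fun v : Int × Int => (var1, v)) ∘ (fun j => PySem.List.pyGetD datas j (0, 0)) from rfl]
  rw [← List.map_map]
  rw [show (fun j => PySem.List.pyGetD datas j (0, 0) != var1 &&
        ((PySem.List.pyGetD datas j (0, 0)).1 == var1.1 ||
         (PySem.List.pyGetD datas j (0, 0)).2 == var1.2 ||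
         pvBoxKey (PySem.List.pyGetD datas j (0, 0)) == pvBoxKey var1))
      = (fun v : Int × Int => (v != var1) && (v.1 == var1.1 || v.2 == var1.2 || pvBoxKey v == pvBoxKey var1))
        ∘ (fun j => PySem.List.pyGetD datas j (0, 0)) from rfl]
  rw [← List.filter_map, PySem.List.map_pyGetD_pyRange_zero]
  congr 1
  congr 1
  apply List.filter_congr
  intro v _
  simp [bne, Bool.beq_comm, pvBoxKey]
theorem pv_main (datas : List (Int × Int)) : prepareArcs datas = prepareArcs_alt datas := by
  unfold prepareArcs prepareArcs_alt
  dsimp only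
  apply List.foldl_ext
  intro acc v1 _
  exact pv_inner_eq datas v1 acc

-- ===== VERDICT (by name: the statement is the Claim_ definition above) =====
theorem prepareArcs_spec : Claim_equal_prepareArcs := by
  intro datas _
  exact pv_main datas
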